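-- pv_equiv track=rewrite | github.com/Miguel-T24/Python_Practices | 1. Basics-Exercises_I/142. check_consecutive_zeroes.py | check_zeroes_consecutive
-- ===== SOURCE A (Python) =====
-- def check_zeroes_consecutive(num):
--     num = list(num)
--     countz = 0
--     counto = 0
--     active = 0
--
--     zeros = []
--     ones = []
--
--     for x in num:
--         if x == "0":
--             zeros.append(x)
--         if x == "1":
--             ones.append(x)
--     if(len(zeros) != len(ones)):
--         return False
--
--     for i in num:
--         if (i == "0" and active == 0):
--             countz += 1
--         elif (i == "1"):
--             counto +=1
--             active = 1
--         elif(i == "0" and active == 1):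
--             if(countz != counto):
--                 return False
--             countz = 1
--             counto = 0
--             active = 0
--
--     return True
-- ===== SOURCE B (Python) =====
-- def check_zeroes_consecutive(num):
--     bits = [c for c in num if c == "0" or c == "1"]
--     if bits.count("0") != bits.count("1"):
--         return False
--     return _pairs_ok(_runs(bits))
--
--
-- def _runs(bits):
--     if not bits:
--         return []
--     c = bits[0]
--     n = 1
--     while n < len(bits) and bits[n] == c:
--         n += 1
--     return [(c, n)] + _runs(bits[n:])
--
--
-- def _pairs_ok(runs):
--     if not runs:
--         return True
--     if runs[0][0] == "1":
--         return False
--     if len(runs) == 1: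
--         return True
--     if runs[0][1] != runs[1][1]:
--         return False
--     return _pairs_ok(runs[2:])
-- ===== Notes on version B (the rewrite author's own statement) =====
-- stated objective: alternative
-- what changed: Replaces A's counter/active-flag state machine by an explicit run-length decomposition: B filters to the 0/1 characters in one comprehension, builds the list of maximal (char, length) runs, and checks that runs start with a zero-run and come in equal-length zero/one pairs (after the same total-count guard).
import Mathlib
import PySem

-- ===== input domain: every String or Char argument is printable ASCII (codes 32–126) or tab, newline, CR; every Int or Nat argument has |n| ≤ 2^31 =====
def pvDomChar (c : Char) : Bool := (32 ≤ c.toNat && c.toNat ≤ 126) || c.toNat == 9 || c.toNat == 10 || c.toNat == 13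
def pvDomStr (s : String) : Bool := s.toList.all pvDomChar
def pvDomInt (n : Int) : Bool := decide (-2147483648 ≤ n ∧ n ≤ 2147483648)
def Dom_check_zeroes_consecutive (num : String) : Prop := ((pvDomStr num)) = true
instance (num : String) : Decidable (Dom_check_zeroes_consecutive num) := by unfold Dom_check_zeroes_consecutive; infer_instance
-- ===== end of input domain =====

-- B replaces A's counter/active-flag state machine by an explicit run-length decomposition
-- (maximal (char, length) runs checked pairwise); alternative decomposition, same cost.

-- ===== PORT A =====
def pvA_loop2 : List Char → Int → Int → Int → Bool
  | [], _, _, _ => true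
  | i :: rest, countz, counto, active =>
    if i = '0' ∧ active = 0 then pvA_loop2 rest (countz + 1) counto active
    else if i = '1' then pvA_loop2 rest countz (counto + 1) 1
    else if i = '0' ∧ active = 1 then
      if countz ≠ counto then false
      else pvA_loop2 rest 1 0 0
    else pvA_loop2 rest countz counto active


def check_zeroes_consecutive (num : String) : Bool :=
  let numL := num.toList
  let zo := numL.foldl (fun (p : List Char × List Char) x =>
      (if x = '0' then p.1 ++ [x] else p.1, if x = '1' then p.2 ++ [x] else p.2)) ([], [])
  if zo.1.length ≠ zo.2.length then false
  else pvA_loop2 numL 0 0 0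

-- ===== PORT B =====
def pvB_runs : List Char → List (Char × Int)
  | [] => []
  | c :: rest =>
    (c, 1 + (rest.takeWhile (fun x => x = c)).length) ::
      pvB_runs (rest.dropWhile (fun x => x = c))
termination_by l => l.length
decreasing_by
  exact Nat.lt_succ_of_le (List.length_dropWhile_le _ _)

def pvB_pairsOk : List (Char × Int) → Bool
  | [] => true
  | (c, a) :: rs =>
    if c = '1' then false
    else match rs with
      | [] => true
      | (_, b) :: rs' => if a ≠ b then false else pvB_pairsOk rs'


def check_zeroes_consecutive_alt (num : String) : Bool :=
  let bits := num.toList.filter (fun c => c == '0' || c == '1')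
  if bits.count '0' ≠ bits.count '1' then false
  else pvB_pairsOk (pvB_runs bits)

-- ===== PRECONDITION & SPEC =====
def Spec_check_zeroes_consecutive (num : String) (out : Bool) : Prop := out = check_zeroes_consecutive_alt num
instance (num : String) (out : Bool) : Decidable (Spec_check_zeroes_consecutive num out) := by unfold Spec_check_zeroes_consecutive; infer_instance

-- ===== CLAIM (what is proved, stated in full; the proofs are below) =====
def Claim_equal_check_zeroes_consecutive : Prop := ∀ (num : String), Dom_check_zeroes_consecutive num → Spec_check_zeroes_consecutive num (check_zeroes_consecutive num)

-- ===== LEMMAS AND PROOFS =====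
lemma pvA_loop2_filter (l : List Char) (cz co a : Int) :
    pvA_loop2 l cz co a = pvA_loop2 (l.filter (fun c => c == '0' || c == '1')) cz co a := by
  induction l generalizing cz co a with
  | nil => rfl
  | cons c rest ih =>
    by_cases h0 : c = '0'
    · subst h0
      simp only [List.filter_cons, show (('0' == '0' || '0' == '1')) = true from rfl, if_pos]
      simp only [pvA_loop2]
      split_ifs <;> (first | rfl | apply ih)
    · by_cases h1 : c = '1'
      · subst h1
        simp only [List.filter_cons, show (('1' == '0' || '1' == '1')) = true from rfl, if_pos]
        simp only [pvA_loop2]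
        split_ifs <;> (first | rfl | apply ih)
      · have : ((c == '0' || c == '1')) = false := by simp [h0, h1]
        simp only [List.filter_cons, this, Bool.false_eq_true, if_false]
        simp only [pvA_loop2, h0, h1, false_and, if_false]
        · apply ih

lemma pvA_loop2_zeros (t : List Char) (ht : ∀ c ∈ t, c = '0') (rest : List Char) (cz co : Int) :
    pvA_loop2 (t ++ rest) cz co 0 = pvA_loop2 rest (cz + t.length) co 0 := by
  induction t generalizing cz with
  | nil => simp
  | cons c t' ih =>
    have hc : c = '0' := ht c (by simp)
    subst hc
    simp only [List.cons_append, pvA_loop2, and_self, if_pos, List.length_cons]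
    rw [ih (fun c hc => ht c (by simp [hc]))]
    congr 1
    push_cast; ring

lemma pvA_loop2_ones (t : List Char) (ht : ∀ c ∈ t, c = '1') (rest : List Char) (cz co : Int) :
    pvA_loop2 (t ++ rest) cz co 1 = pvA_loop2 rest cz (co + t.length) 1 := by
  induction t generalizing co with
  | nil => simp
  | cons c t' ih =>
    have hc : c = '1' := ht c (by simp)
    subst hc
    have h01 : ('1' : Char) ≠ '0' := by decide
    simp only [List.cons_append, pvA_loop2, h01, false_and, if_false, if_pos, List.length_cons]
    rw [ih (fun c hc => ht c (by simp [hc]))]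
    congr 1
    push_cast; ring


lemma pv_dropWhile_head_false {p : Char → Bool} :
    ∀ (l : List Char) (e : Char) (d' : List Char), l.dropWhile p = e :: d' → p e = false := by
  intro l
  induction l with
  | nil => simp [List.dropWhile]
  | cons c rest ih =>
    intro e d' h
    by_cases hp : p c
    · rw [List.dropWhile_cons_of_pos hp] at h; exact ih _ _ h
    · rw [List.dropWhile_cons_of_neg hp] at h
      cases h
      simpa using hp

lemma pv_key : ∀ (n : Nat) (bits : List Char), bits.length ≤ n →
    (∀ c ∈ bits, c = '0' ∨ c = '1') → (bits = [] ∨ bits.head? = some '1') →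
    ∀ a : Int, 1 ≤ a → a + (bits.count '0' : Int) = (bits.count '1' : Int) →
    pvA_loop2 bits a 0 0 = pvB_pairsOk (('0', a) :: pvB_runs bits) := by
  intro n
  induction n with
  | zero =>
    intro bits hlen _ _ a _ _
    have hb : bits = [] := List.eq_nil_of_length_eq_zero (Nat.le_zero.mp hlen)
    subst hb
    simp [pvA_loop2, pvB_runs, pvB_pairsOk]
  | succ n ih =>
    rintro bits hlen h01 (rfl | hhead) a ha hbal
    · simp [pvA_loop2, pvB_runs, pvB_pairsOk]
    · obtain ⟨c, rest, rfl⟩ : ∃ c rest, bits = c :: rest := by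
        cases bits with
        | nil => simp at hhead
        | cons c rest => exact ⟨c, rest, rfl⟩
      have hc : c = '1' := by simpa using hhead
      subst hc
      set t := rest.takeWhile (fun x => x = '1') with htdef
      set d := rest.dropWhile (fun x => x = '1') with hddef
      have hrest : t ++ d = rest := List.takeWhile_append_dropWhile
      have ht1 : ∀ x ∈ t, x = '1' := fun x hx => by simpa using List.mem_takeWhile_imp hx
      -- counts of bits
      have htc0 : t.count '0' = 0 := by
        rw [List.count_eq_zero]
        intro h; have := ht1 _ h; simp_all
      have htc1 : t.count '1' = t.length := by
        rw [List.count_eq_length]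
        intro x hx; simpa [beq_iff_eq] using (ht1 x hx).symm
      have hcount0 : (('1' :: rest).count '0') = d.count '0' := by
        rw [← hrest]; simp [List.count_append, htc0]
      have hcount1 : (('1' :: rest).count '1') = 1 + t.length + d.count '1' := by
        rw [← hrest]
        simp [List.count_append, htc1]
        omega
      -- LHS consumes the '1' run
      have hL : pvA_loop2 ('1' :: rest) a 0 0 = pvA_loop2 d a (1 + t.length) 1 := by
        have h1 : pvA_loop2 ('1' :: rest) a 0 0 = pvA_loop2 rest a 1 1 := by
          simp [pvA_loop2]
        rw [h1, ← hrest, pvA_loop2_ones t ht1 d a 1]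
      -- RHS shape
      have hR : pvB_runs ('1' :: rest) = ('1', 1 + (t.length : Int)) :: pvB_runs d := by
        rw [pvB_runs]
      rw [hL, hR]
      cases hd : d with
      | nil =>
        have hab : a = 1 + (t.length : Int) := by
          rw [hcount0, hcount1, hd] at hbal
          simp at hbal
          push_cast at hbal
          omega
        simp [pvA_loop2, pvB_pairsOk, pvB_runs, hab]
      | cons e d' =>
        have he : e = '0' := by
          have hne1 : (fun x => decide (x = '1')) e = false :=
            pv_dropWhile_head_false rest e d' (by rw [← hddef, hd])
          have hmem : e ∈ ('1' :: rest) := by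
            rw [← hrest, hd]; simp
          rcases h01 e hmem with h | h
          · exact h
          · simp [h] at hne1
        subst he
        -- A's loop hits the check
        have hstep : pvA_loop2 ('0' :: d') a (1 + (t.length : Int)) 1 =
            if a ≠ 1 + (t.length : Int) then false else pvA_loop2 d' 1 0 0 := by
          simp [pvA_loop2]
        rw [hstep]
        have hpairs : pvB_pairsOk (('0', a) :: ('1', 1 + (t.length : Int)) :: pvB_runs ('0' :: d')) =
            if a ≠ 1 + (t.length : Int) then false else pvB_pairsOk (pvB_runs ('0' :: d')) := by
          simp [pvB_pairsOk]
        rw [hpairs]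
        by_cases hab : a = 1 + (t.length : Int)
        · subst hab
          have hnn : ¬(1 + (t.length : Int) ≠ 1 + (t.length : Int)) := fun h => h rfl
          rw [if_neg hnn, if_neg hnn]
          -- remains: pvA_loop2 d' 1 0 0 = pvB_pairsOk (pvB_runs ('0'::d'))
          set t2 := d'.takeWhile (fun x => x = '0') with ht2def
          set d2 := d'.dropWhile (fun x => x = '0') with hd2def
          have hd' : t2 ++ d2 = d' := List.takeWhile_append_dropWhile
          have ht20 : ∀ x ∈ t2, x = '0' := fun x hx => by simpa using List.mem_takeWhile_imp hx
          have hL2 : pvA_loop2 d' 1 0 0 = pvA_loop2 d2 (1 + (t2.length : Int)) 0 0 := by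
            rw [← hd', pvA_loop2_zeros t2 ht20 d2 1 0]
          have hR2 : pvB_runs ('0' :: d') = ('0', 1 + (t2.length : Int)) :: pvB_runs d2 := by
            rw [pvB_runs]
          rw [hL2, hR2]
          -- apply induction hypothesis
          have hmem2 : ∀ x ∈ d2, x ∈ '1' :: rest := by
            intro x hx
            have hxd' : x ∈ d' := by rw [← hd']; exact List.mem_append_right _ hx
            have hxd : x ∈ d := by rw [hd]; exact List.mem_cons_of_mem _ hxd'
            have hxtd : x ∈ t ++ d := List.mem_append_right _ hxd
            rw [hrest] at hxtd
            exact List.mem_cons_of_mem _ hxtd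
          have hhead2 : d2 = [] ∨ d2.head? = some '1' := by
            cases hd2 : d2 with
            | nil => exact Or.inl rfl
            | cons e2 d2' =>
              right
              have hne0 : (fun x => decide (x = '0')) e2 = false :=
                pv_dropWhile_head_false d' e2 d2' (by rw [← hd2def, hd2])
              have : e2 ∈ '1' :: rest := hmem2 e2 (by rw [hd2]; simp)
              rcases h01 e2 this with h | h
              · simp [h] at hne0
              · simp [h]
          have hlen2 : d2.length ≤ n := by
            have h1 : d2.length ≤ d'.length := by
              rw [hd2def]; exact List.length_dropWhile_le _ _
            have h2 : d.length ≤ rest.length := by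
              rw [hddef]; exact List.length_dropWhile_le _ _
            have h3 : d.length = d'.length + 1 := by rw [hd]; simp
            simp only [List.length_cons] at hlen
            omega
          have hbal2 : (1 + (t2.length : Int)) + (d2.count '0' : Int) = (d2.count '1' : Int) := by
            have ht2c0 : t2.count '0' = t2.length := by
              rw [List.count_eq_length]
              intro x hx; simpa [beq_iff_eq] using (ht20 x hx).symm
            have ht2c1 : t2.count '1' = 0 := by
              rw [List.count_eq_zero]
              intro h; have := ht20 _ h; simp_all
            have hdc0 : d.count '0' = 1 + t2.length + d2.count '0' := by
              rw [hd, ← hd']; simp [List.count_append, ht2c0]; ring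
            have hdc1 : d.count '1' = d2.count '1' := by
              rw [hd, ← hd']; simp [List.count_append, ht2c1]
            rw [hcount0, hcount1, hdc0, hdc1] at hbal
            push_cast at hbal ⊢
            omega
          have := ih d2 hlen2 (fun x hx => h01 x (hmem2 x hx)) hhead2
            (1 + (t2.length : Int)) (by omega) hbal2
          exact this
        · simp [hab]


-- ===== VERDICT (by name: the statement is the Claim_ definition above) =====
theorem check_zeroes_consecutive_spec : Claim_equal_check_zeroes_consecutive := by
  unfold Claim_equal_check_zeroes_consecutive Spec_check_zeroes_consecutive
  intro num _
  unfold check_zeroes_consecutive check_zeroes_consecutive_alt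
  dsimp only
  set numL := num.toList with hnumL
  set bits := numL.filter (fun c => c == '0' || c == '1') with hbits
  have h01 : ∀ c ∈ bits, c = '0' ∨ c = '1' := by
    intro c hc
    rw [hbits, List.mem_filter] at hc
    have := hc.2
    simp only [Bool.or_eq_true, beq_iff_eq] at this
    exact this
  rw [PySem.List.foldl_prod_mk (f := fun acc x => if x = '0' then acc ++ [x] else acc)
      (g := fun acc x => if x = '1' then acc ++ [x] else acc),
      PySem.List.foldl_append_ite_eq_filter, PySem.List.foldl_append_ite_eq_filter]
  have hfe0 : (fun x => decide (x = '0')) = (fun x : Char => x == '0') := by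
    funext x; by_cases h : x = '0' <;> simp [h]
  have hfe1 : (fun x => decide (x = '1')) = (fun x : Char => x == '1') := by
    funext x; by_cases h : x = '1' <;> simp [h]
  have hc0 : ([] ++ numL.filter (fun x => decide (x = '0'))).length = bits.count '0' := by
    rw [List.nil_append, hfe0, ← List.count_eq_length_filter, hbits,
        List.count_filter (by simp)]
  have hc1 : ([] ++ numL.filter (fun x => decide (x = '1'))).length = bits.count '1' := by
    rw [List.nil_append, hfe1, ← List.count_eq_length_filter, hbits,
        List.count_filter (by simp)]
  rw [hc0, hc1]
  by_cases hcnt : bits.count '0' = bits.count '1'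
  · rw [if_neg (fun h => h hcnt), if_neg (fun h => h hcnt)]
    rw [pvA_loop2_filter]
    rw [← hbits]
    cases hb : bits with
    | nil => simp [pvA_loop2, pvB_runs, pvB_pairsOk]
    | cons c rest =>
      have hcm : c = '0' ∨ c = '1' := h01 c (by rw [hb]; simp)
      rcases hcm with rfl | rfl
      · -- starts with a zero run
        set t2 := rest.takeWhile (fun x => x = '0') with ht2def
        set d2 := rest.dropWhile (fun x => x = '0') with hd2def
        have hd' : t2 ++ d2 = rest := List.takeWhile_append_dropWhile
        have ht20 : ∀ x ∈ t2, x = '0' := fun x hx => by simpa using List.mem_takeWhile_imp hx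
        have hL : pvA_loop2 ('0' :: rest) 0 0 0 = pvA_loop2 d2 (1 + (t2.length : Int)) 0 0 := by
          have h1 : pvA_loop2 ('0' :: rest) 0 0 0 = pvA_loop2 rest 1 0 0 := by
            simp [pvA_loop2]
          rw [h1, ← hd', pvA_loop2_zeros t2 ht20 d2 1 0]
        have hR : pvB_runs ('0' :: rest) = ('0', 1 + (t2.length : Int)) :: pvB_runs d2 := by
          rw [pvB_runs]
        rw [hL, hR]
        have hmem2 : ∀ x ∈ d2, x ∈ bits := by
          intro x hx
          have hxr : x ∈ rest := by rw [← hd']; exact List.mem_append_right _ hx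
          rw [hb]; exact List.mem_cons_of_mem _ hxr
        have hhead2 : d2 = [] ∨ d2.head? = some '1' := by
          cases hdd : d2 with
          | nil => exact Or.inl rfl
          | cons e2 d2' =>
            right
            have hne0 : (fun x => decide (x = '0')) e2 = false :=
              pv_dropWhile_head_false rest e2 d2' (by rw [← hd2def, hdd])
            rcases h01 e2 (hmem2 e2 (by rw [hdd]; simp)) with h | h
            · simp [h] at hne0
            · simp [h]
        have hbal2 : (1 + (t2.length : Int)) + (d2.count '0' : Int) = (d2.count '1' : Int) := by
          have ht2c0 : t2.count '0' = t2.length := by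
            rw [List.count_eq_length]
            intro x hx; simpa [beq_iff_eq] using (ht20 x hx).symm
          have ht2c1 : t2.count '1' = 0 := by
            rw [List.count_eq_zero]
            intro h; have := ht20 _ h; simp_all
          have e0 : bits.count '0' = 1 + t2.length + d2.count '0' := by
            rw [hb, ← hd']; simp [List.count_append, ht2c0]; omega
          have e1 : bits.count '1' = d2.count '1' := by
            rw [hb, ← hd']; simp [List.count_append, ht2c1]
          rw [e0, e1] at hcnt
          push_cast
          omega
        exact pv_key d2.length d2 le_rfl (fun x hx => h01 x (hmem2 x hx)) hhead2 _ (by omega) hbal2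
      · -- starts with a one run: both sides are false
        set t := rest.takeWhile (fun x => x = '1') with htdef
        set d := rest.dropWhile (fun x => x = '1') with hddef
        have hrest : t ++ d = rest := List.takeWhile_append_dropWhile
        have ht1 : ∀ x ∈ t, x = '1' := fun x hx => by simpa using List.mem_takeWhile_imp hx
        have htc0 : t.count '0' = 0 := by
          rw [List.count_eq_zero]
          intro h; have := ht1 _ h; simp_all
        have htc1 : t.count '1' = t.length := by
          rw [List.count_eq_length]
          intro x hx; simpa [beq_iff_eq] using (ht1 x hx).symm
        have hR : pvB_pairsOk (pvB_runs ('1' :: rest)) = false := by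
          rw [pvB_runs]; unfold pvB_pairsOk; simp
        rw [hR]
        have hL : pvA_loop2 ('1' :: rest) 0 0 0 = pvA_loop2 d 0 (1 + (t.length : Int)) 1 := by
          have h1 : pvA_loop2 ('1' :: rest) 0 0 0 = pvA_loop2 rest 0 1 1 := by
            simp [pvA_loop2]
          rw [h1, ← hrest, pvA_loop2_ones t ht1 d 0 1]
        rw [hL]
        cases hdd : d with
        | nil =>
          exfalso
          have e0 : bits.count '0' = 0 := by
            rw [hb, ← hrest, hdd]; simp [List.count_append, htc0]
          have e1 : bits.count '1' = 1 + t.length := by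
            rw [hb, ← hrest, hdd]; simp [List.count_append, htc1]; omega
          omega
        | cons e d' =>
          have he : e = '0' := by
            have hne1 : (fun x => decide (x = '1')) e = false :=
              pv_dropWhile_head_false rest e d' (by rw [← hddef, hdd])
            have hmem : e ∈ bits := by
              rw [hb, ← hrest, hdd]; simp
            rcases h01 e hmem with h | h
            · exact h
            · simp [h] at hne1
          subst he
          have : (0 : Int) ≠ 1 + (t.length : Int) := by omega
          simp [pvA_loop2, this]
  · rw [if_pos hcnt, if_pos hcnt]
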